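-- pv_equiv track=rewrite | github.com/Linzwcs/semafs | semafs/algo/rebalance/reviewer.py | _has_invalid_group_path
-- ===== SOURCE A (Python) =====
-- def _has_invalid_group_path(relative_segments: list[str]) -> bool:
--     if not relative_segments:
--         return True
--     # Reject repeated segments (e.g. root.work.work / root.a.b.a).
--     seen: set[str] = set()
--     for seg in relative_segments:
--         if seg in seen:
--             return True
--         seen.add(seg)
--     return False
-- ===== SOURCE B (Python) =====
-- def _has_invalid_group_path(relative_segments: list[str]) -> bool:
--     # Sort, then scan adjacent pairs: any repeated segment becomes adjacent
--     # in sorted order. Empty input is invalid as well. No set is used.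
--     ordered = sorted(relative_segments)
--     return len(ordered) == 0 or any(a == b for a, b in zip(ordered, ordered[1:]))
-- ===== Notes on version B (the rewrite author's own statement) =====
-- stated objective: alternative
-- what changed: Replaces A's incremental hash-set membership loop by sort-then-adjacent-pair scan: duplicates are adjacent after sorting, so no auxiliary set is maintained at all.
import Mathlib
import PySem

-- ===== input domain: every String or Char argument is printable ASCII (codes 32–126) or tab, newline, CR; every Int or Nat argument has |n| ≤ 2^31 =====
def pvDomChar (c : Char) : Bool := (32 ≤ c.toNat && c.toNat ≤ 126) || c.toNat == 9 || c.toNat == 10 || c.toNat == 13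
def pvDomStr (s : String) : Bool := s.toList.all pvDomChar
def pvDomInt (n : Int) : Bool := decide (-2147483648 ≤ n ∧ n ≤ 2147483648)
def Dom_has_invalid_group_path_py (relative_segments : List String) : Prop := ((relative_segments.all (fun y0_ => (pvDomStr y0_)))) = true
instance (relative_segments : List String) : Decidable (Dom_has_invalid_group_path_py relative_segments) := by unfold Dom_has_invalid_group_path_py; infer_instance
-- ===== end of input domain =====

-- B replaces A's incremental seen-set loop by sort-then-adjacent-pair scan
-- (duplicates are adjacent after sorting; no set is maintained). Objective: alternative.

-- ===== PORT A =====
-- the 'for seg in relative_segments' loop with its early 'return True'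
def hasInvalidLoop (segs : List String) (seen : PySem.Set String) : Bool :=
  match segs with
  | [] => false
  | seg :: rest =>
    if PySem.Set.contains seen seg then true
    else hasInvalidLoop rest (PySem.Set.add seen seg)

def has_invalid_group_path_py (relative_segments : List String) : Bool :=
  if relative_segments.isEmpty then true
  else hasInvalidLoop relative_segments PySem.Set.empty

-- ===== PORT B =====
def has_invalid_group_path_py_alt (relative_segments : List String) : Bool :=
  let ordered := PySem.List.sorted relative_segments (fun x => x) false
  decide (ordered.length = 0) || (ordered.zip ordered.tail).any (fun p => p.1 == p.2)

-- ===== PRECONDITION & SPEC =====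
def Spec_has_invalid_group_path_py (relative_segments : List String) (out : Bool) : Prop := out = has_invalid_group_path_py_alt relative_segments
instance (relative_segments : List String) (out : Bool) : Decidable (Spec_has_invalid_group_path_py relative_segments out) := by unfold Spec_has_invalid_group_path_py; infer_instance

-- ===== CLAIM =====
def Claim_equal_has_invalid_group_path_py : Prop := ∀ (relative_segments : List String), Dom_has_invalid_group_path_py relative_segments → Spec_has_invalid_group_path_py relative_segments (has_invalid_group_path_py relative_segments)

-- ===== LEMMAS AND PROOFS =====

-- A's loop returns true iff segs has a repeat or some element already lies in 'seen'.
theorem hasInvalidLoop_true_iff (segs : List String) (seen : PySem.Set String) :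
    hasInvalidLoop segs seen = true ↔
      ¬ segs.Nodup ∨ ∃ y ∈ segs, y ∈ (seen : List String) := by
  induction segs generalizing seen with
  | nil => simp [hasInvalidLoop]
  | cons x xs ih =>
    rw [hasInvalidLoop]
    by_cases hx : PySem.Set.contains seen x
    · have hxs : x ∈ (seen : List String) := by
        simpa [PySem.Set.contains, List.contains_eq_mem] using hx
      simp only [hx, if_pos]
      constructor
      · intro _; exact Or.inr ⟨x, by simp, hxs⟩
      · intro _; trivial
    · have hxs : x ∉ (seen : List String) := by
        simpa [PySem.Set.contains, List.contains_eq_mem] using hx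
      have hadd : (PySem.Set.add seen x : List String) = seen ++ [x] := by
        simp only [PySem.Set.add]
        rw [if_neg hx]
      rw [if_neg hx, ih]
      rw [hadd]
      simp only [List.nodup_cons, List.mem_append, List.mem_cons, List.not_mem_nil, or_false]
      constructor
      · rintro (hnd | ⟨y, hy, hmem | rfl⟩)
        · exact Or.inl (fun ⟨_, h⟩ => hnd h)
        · exact Or.inr ⟨y, Or.inr hy, hmem⟩
        · exact Or.inl (fun ⟨h, _⟩ => h hy)
      · rintro (hnd | ⟨y, rfl | hy, hmem⟩)
        · by_cases hin : x ∈ xs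
          · exact Or.inr ⟨x, hin, Or.inr rfl⟩
          · exact Or.inl (fun h => hnd ⟨hin, h⟩)
        · exact absurd hmem hxs
        · exact Or.inr ⟨y, hy, Or.inl hmem⟩

-- In a ≤-sorted list, a duplicate exists iff some adjacent pair is equal.
theorem adj_eq_not_nodup (ys : List String) (h : ys.Pairwise (· ≤ ·)) :
    ((ys.zip ys.tail).any (fun p => p.1 == p.2)) = !decide ys.Nodup := by
  induction ys with
  | nil => simp
  | cons a t ih =>
    match t, h with
    | [], _ => simp
    | b :: t', h =>
      have hpt : (b :: t').Pairwise (· ≤ ·) := h.tail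
      have hih := ih hpt
      simp only [List.tail_cons, List.zip_cons_cons, List.any_cons] at *
      rw [hih]
      by_cases hnd : (b :: t').Nodup
      · have hmem : a ∈ b :: t' ↔ a = b := by
          constructor
          · intro hm
            rcases List.mem_cons.mp hm with h1 | h1
            · exact h1
            · -- a ∈ t': a ≤ b from h, b ≤ a from pairwise of t
              have hab : a ≤ b := (List.pairwise_cons.mp h).1 b (by simp)
              have hba : b ≤ a := (List.pairwise_cons.mp hpt).1 a h1
              exact le_antisymm hab hba
          · intro h1; simp [h1]
        by_cases hb : a = b
        · simp [hb, hnd, List.nodup_cons]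
        · have : a ∉ b :: t' := fun hm => hb (hmem.mp hm)
          simp [hb, hnd, List.nodup_cons, this]
      · simp [hnd, List.nodup_cons]

-- ===== VERDICT =====
theorem has_invalid_group_path_py_spec : Claim_equal_has_invalid_group_path_py := by
  intro xs _
  unfold Spec_has_invalid_group_path_py has_invalid_group_path_py has_invalid_group_path_py_alt
  by_cases h : xs.isEmpty
  · have : xs = [] := List.isEmpty_iff.mp h
    subst this
    simp [PySem.List.sorted]
  · rw [if_neg h]
    have hne : xs ≠ [] := fun he => h (by simp [he])
    have hlen0 : ¬ ((PySem.List.sorted xs (fun x => x) false).length = 0) := by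
      rw [PySem.List.length_sorted]; simpa using hne
    have hperm := PySem.List.sorted_perm xs (fun x => x) false
    have hpw : (PySem.List.sorted xs (fun x => x) false).Pairwise (· ≤ ·) :=
      PySem.List.sorted_pairwise xs (fun x => x)
    dsimp only
    rw [adj_eq_not_nodup _ hpw]
    simp only [hlen0, decide_false, Bool.false_or]
    refine Bool.eq_iff_iff.mpr ?_
    rw [hasInvalidLoop_true_iff]
    simp [PySem.Set.empty, hperm.nodup_iff]
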